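-- pv_equiv track=rewrite | github.com/pnnl/BIM2RDF | mapping/mapping/mapping.py | strip_constraint
-- ===== SOURCE A (Python) =====
-- def strip_constraint(tbl_schema: str) -> str:
--     # todo: inelegant
--     has_constraint = lambda s: ('constraint "' in s.lower()) or ('primary key' in s.lower())
--     if not has_constraint(tbl_schema):
--         return tbl_schema
--     else:
--         parts = []
--         for part in tbl_schema.split(','):
--             if not has_constraint(part): parts.append(part)
--             else: break # expecting contraints to be last
--         tbl_schema = ','.join(parts)
--         tbl_schema += ')'
--         assert(not has_constraint(tbl_schema))
--         return tbl_schema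
-- ===== SOURCE B (Python) =====
-- def strip_constraint(tbl_schema: str) -> str:
--     low = tbl_schema.lower()
--     i1 = low.find('constraint "')
--     i2 = low.find('primary key')
--     if i1 == -1 and i2 == -1:
--         return tbl_schema
--     pos = i2 if i1 == -1 else (i1 if i2 == -1 else min(i1, i2))
--     cut = low.rfind(',', 0, pos)
--     if cut == -1:
--         return ')'
--     return tbl_schema[:cut] + ')'
-- ===== Notes on version B (the rewrite author's own statement) =====
-- stated objective: idiomatic
-- what changed: Instead of splitting the schema on commas and looping over the parts until one contains a constraint keyword, B lowercases once, locates the first keyword occurrence with str.find, finds the last comma before it with str.rfind, and slices the prefix directly.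
import Mathlib
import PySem

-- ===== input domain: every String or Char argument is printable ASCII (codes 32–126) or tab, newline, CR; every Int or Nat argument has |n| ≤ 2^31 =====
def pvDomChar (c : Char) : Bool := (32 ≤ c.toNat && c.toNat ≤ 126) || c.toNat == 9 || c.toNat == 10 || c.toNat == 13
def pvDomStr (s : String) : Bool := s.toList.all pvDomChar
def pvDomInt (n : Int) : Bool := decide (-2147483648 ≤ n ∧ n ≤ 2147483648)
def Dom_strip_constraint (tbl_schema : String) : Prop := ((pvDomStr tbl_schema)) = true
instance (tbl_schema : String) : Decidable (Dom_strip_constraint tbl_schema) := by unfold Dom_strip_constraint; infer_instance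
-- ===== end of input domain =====

-- B replaces A's split-into-parts loop by two find's and one rfind on the lowered string; return value only, no mutation.

-- ===== PORT A =====
-- the two keyword literals of A's `has_constraint` lambda
def pvK1 : List Char := "constraint \"".toList
def pvK2 : List Char := "primary key".toList

-- has_constraint = lambda s: ('constraint "' in s.lower()) or ('primary key' in s.lower())
def pvHasConstraint (s : List Char) : Bool :=
  PySem.Chars.isIn pvK1 (PySem.Chars.lower s) || PySem.Chars.isIn pvK2 (PySem.Chars.lower s)

-- the for-loop over tbl_schema.split(',') with `break` at the first constraint part
def pvTakeParts : List (List Char) → List (List Char)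
  | [] => []
  | p :: ps => if pvHasConstraint p then [] else p :: pvTakeParts ps

def strip_constraint (tbl_schema : String) : String :=
  if pvHasConstraint tbl_schema.toList = false then tbl_schema
  else
    let parts := pvTakeParts (PySem.Chars.splitOn tbl_schema.toList [','])
    -- ','.join(parts) + ')'.  The final `assert not has_constraint(...)` never fires on any
    -- input (the kept prefix contains no keyword occurrence, and neither keyword contains
    -- a comma or ')'), so A always returns this value.
    String.ofList (PySem.Chars.join [','] parts ++ [')'])

-- ===== PORT B =====
def strip_constraint_alt (tbl_schema : String) : String :=
  let low := PySem.Chars.lower tbl_schema.toList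
  let i1 := PySem.Chars.find low pvK1
  let i2 := PySem.Chars.find low pvK2
  if i1 = -1 ∧ i2 = -1 then tbl_schema
  else
    let pos := if i1 = -1 then i2 else if i2 = -1 then i1 else min i1 i2
    let cut := PySem.Chars.rfindFrom low [','] 0 (some pos)
    if cut = -1 then ")"
    else String.ofList (PySem.Chars.slice tbl_schema.toList none (some cut) ++ [')'])

-- ===== PRECONDITION & SPEC =====
def Spec_strip_constraint (tbl_schema : String) (out : String) : Prop := out = strip_constraint_alt tbl_schema
instance (tbl_schema : String) (out : String) : Decidable (Spec_strip_constraint tbl_schema out) := by unfold Spec_strip_constraint; infer_instance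

-- ===== CLAIM (what is proved, stated in full; the proofs are below) =====
def Claim_equal_strip_constraint : Prop := ∀ (tbl_schema : String), Dom_strip_constraint tbl_schema → Spec_strip_constraint tbl_schema (strip_constraint tbl_schema)

-- ===== LEMMAS AND PROOFS =====

-- an occurrence of either keyword at position p of the (lowered) list
def pvOcc (low : List Char) (p : Nat) : Prop := pvK1 <+: low.drop p ∨ pvK2 <+: low.drop p

-- reference single-char split on ',' (proof-side mirror of PySem.Chars.splitOn · [','])
def mySplit : List Char → List (List Char)
  | [] => [[]]
  | c :: t => if c = ',' then [] :: mySplit t else (c :: (mySplit t).headI) :: (mySplit t).tail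

-- index of the last ',' strictly before position p, if any
def lastComma (s : List Char) : Nat → Option Nat
  | 0 => none
  | p + 1 => if s[p]? = some ',' then some p else lastComma s p

-- ---- basic facts ----

lemma headI_cons_tail {α : Type} [Inhabited α] (l : List α) (h : l ≠ []) : l.headI :: l.tail = l := by
  cases l with
  | nil => exact absurd rfl h
  | cons a t => rfl

lemma mySplit_ne_nil (l : List Char) : mySplit l ≠ [] := by
  cases l with
  | nil => simp [mySplit]
  | cons c t => unfold mySplit; split <;> simp

lemma splitOn_go_eq (fuel : Nat) : ∀ (l cur : List Char) (acc : List (List Char)),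
    l.length < fuel →
    PySem.Chars.splitOn.go [','] fuel l cur acc =
      acc.reverse ++ (cur.reverse ++ (mySplit l).headI) :: (mySplit l).tail := by
  induction fuel with
  | zero => intro l cur acc h; omega
  | succ fuel ih =>
    intro l cur acc h
    cases l with
    | nil =>
      rw [PySem.Chars.splitOn.go]
      simp [mySplit]
      omega
    | cons c rest =>
      rw [PySem.Chars.splitOn.go]
      by_cases hc : c = ','
      · subst hc
        have hpre : [','].isPrefixOf (',' :: rest) = true := by simp [List.isPrefixOf]
        simp only [hpre, if_pos, List.length_cons, List.drop_succ_cons, List.length_nil,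
          List.drop_zero]
        rw [ih rest [] (cur.reverse :: acc) (by simpa using Nat.lt_of_succ_lt_succ h)]
        simp [mySplit]
        exact headI_cons_tail _ (mySplit_ne_nil rest)
      · have hpre : [','].isPrefixOf (c :: rest) = false := by
          simp [List.isPrefixOf]; exact fun hh => (hc hh.symm).elim
        simp only [hpre, Bool.false_eq_true, if_neg, not_false_iff]
        rw [ih rest (c :: cur) acc (by simpa using Nat.lt_of_succ_lt_succ h)]
        simp [mySplit, hc]

lemma splitOn_eq (s : List Char) : PySem.Chars.splitOn s [','] = mySplit s := by
  unfold PySem.Chars.splitOn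
  rw [splitOn_go_eq (s.length + 1) s [] [] (Nat.lt_succ_self _)]
  simp
  cases hms : mySplit s with
  | nil => exact absurd hms (mySplit_ne_nil s)
  | cons p ps => simp

lemma mySplit_no_comma (s : List Char) (h : ',' ∉ s) : mySplit s = [s] := by
  induction s with
  | nil => rfl
  | cons c t ih =>
    have hc : c ≠ ',' := fun hc => h (hc ▸ List.mem_cons_self ..)
    have ht := ih (fun hm => h (List.mem_cons_of_mem _ hm))
    simp [mySplit, hc, ht]

lemma mySplit_append (a r : List Char) (h : ',' ∉ a) :
    mySplit (a ++ ',' :: r) = a :: mySplit r := by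
  induction a with
  | nil => simp [mySplit]
  | cons c t ih =>
    have hc : c ≠ ',' := fun hc => h (hc ▸ List.mem_cons_self ..)
    have ht := ih (fun hm => h (List.mem_cons_of_mem _ hm))
    simp [mySplit, hc, ht]

lemma lower_append_comma (a r : List Char) :
    PySem.Chars.lower (a ++ ',' :: r) = PySem.Chars.lower a ++ ',' :: PySem.Chars.lower r := by
  simp [PySem.Chars.lower]
  rfl

lemma lowerChar_eq_comma_iff (c : Char) : PySem.Chars.lowerChar c = ',' ↔ c = ',' := by
  unfold PySem.Chars.lowerChar PySem.Chars.isupper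
  split
  · rename_i h
    simp only [Bool.and_eq_true, decide_eq_true_eq, Char.le_def, UInt32.le_iff_toNat_le] at h
    have h1 : 65 ≤ c.toNat := h.1
    have h2 : c.toNat ≤ 90 := h.2
    constructor
    · intro hh
      exfalso
      have := congrArg Char.toNat hh
      rw [Char.toNat_ofNat] at this
      have hv : Nat.isValidChar (c.toNat + 32) := Or.inl (by omega)
      rw [if_pos hv] at this
      have h44 : (','.toNat) = 44 := by decide
      omega
    · intro hh
      subst hh
      exfalso
      have : (','.toNat) = 44 := by decide
      omega
  · simp

lemma lower_comma_iff (s : List Char) (j : Nat) :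
    (PySem.Chars.lower s)[j]? = some ',' ↔ s[j]? = some ',' := by
  simp only [PySem.Chars.lower, List.getElem?_map, Option.map_eq_some_iff]
  constructor
  · rintro ⟨c, hc, hl⟩
    rw [(lowerChar_eq_comma_iff c).mp hl] at hc
    exact hc
  · intro hc
    exact ⟨',', hc, (lowerChar_eq_comma_iff ',').mpr rfl⟩

-- ---- occurrence bookkeeping ----

lemma hasC_iff (s : List Char) :
    pvHasConstraint s = true ↔ ∃ p, pvOcc (PySem.Chars.lower s) p := by
  unfold pvHasConstraint pvOcc
  rw [Bool.or_eq_true, ← PySem.Chars.exists_prefix_drop_iff_isIn,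
    ← PySem.Chars.exists_prefix_drop_iff_isIn]
  constructor
  · rintro (⟨j, hj⟩ | ⟨j, hj⟩)
    · exact ⟨j, Or.inl hj⟩
    · exact ⟨j, Or.inr hj⟩
  · rintro ⟨p, hp | hp⟩
    · exact Or.inl ⟨p, hp⟩
    · exact Or.inr ⟨p, hp⟩

lemma occ_left {K A : List Char} (R : List Char) (p : Nat) (h : K <+: A.drop p) :
    K <+: (A ++ ',' :: R).drop p := by
  rw [List.drop_append]
  exact h.trans (List.prefix_append _ _)

lemma occ_right {K : List Char} (A R : List Char) (q : Nat) (h : K <+: R.drop q) :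
    K <+: (A ++ ',' :: R).drop (A.length + 1 + q) := by
  rw [List.drop_append, List.drop_eq_nil_of_le (by omega), List.nil_append]
  have : A.length + 1 + q - A.length = q + 1 := by omega
  rw [this, List.drop_succ_cons]
  exact h

lemma prefix_split {K A R : List Char} {p : Nat} (hK : ',' ∉ K)
    (h : K <+: (A ++ ',' :: R).drop p) :
    K <+: A.drop p ∨ (A.length + 1 ≤ p ∧ K <+: R.drop (p - (A.length + 1))) := by
  by_cases hp : A.length + 1 ≤ p
  · right
    refine ⟨hp, ?_⟩
    rw [List.drop_append, List.drop_eq_nil_of_le (by omega), List.nil_append] at h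
    have he : p - A.length = (p - (A.length + 1)) + 1 := by omega
    rw [he, List.drop_succ_cons] at h
    exact h
  · rw [List.drop_append, Nat.sub_eq_zero_of_le (by omega), List.drop_zero] at h
    by_cases hlen : K.length ≤ (A.drop p).length
    · left
      have he := List.prefix_iff_eq_take.mp h
      rw [List.take_append, Nat.sub_eq_zero_of_le hlen, List.take_zero, List.append_nil] at he
      exact he ▸ List.take_prefix _ _
    · exfalso
      have hd : (A.drop p).length < K.length := by omega
      have hk := h.getElem hd
      rw [List.getElem_append_right (Nat.le_refl _)] at hk
      simp only [Nat.sub_self, List.getElem_cons_zero] at hk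
      exact hK (hk ▸ List.getElem_mem hd)

lemma pvOcc_split {A R : List Char} {p : Nat} (h : pvOcc (A ++ ',' :: R) p) :
    pvOcc A p ∨ (A.length + 1 ≤ p ∧ pvOcc R (p - (A.length + 1))) := by
  have h1 : ',' ∉ pvK1 := by decide
  have h2 : ',' ∉ pvK2 := by decide
  rcases h with h | h
  · rcases prefix_split h1 h with h' | ⟨hp, h'⟩
    · exact Or.inl (Or.inl h')
    · exact Or.inr ⟨hp, Or.inl h'⟩
  · rcases prefix_split h2 h with h' | ⟨hp, h'⟩
    · exact Or.inl (Or.inr h')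
    · exact Or.inr ⟨hp, Or.inr h'⟩

lemma pvOcc_left {A : List Char} (R : List Char) {p : Nat} (h : pvOcc A p) :
    pvOcc (A ++ ',' :: R) p := by
  rcases h with h | h
  · exact Or.inl (occ_left R p h)
  · exact Or.inr (occ_left R p h)

lemma pvOcc_right (A : List Char) {R : List Char} {q : Nat} (h : pvOcc R q) :
    pvOcc (A ++ ',' :: R) (A.length + 1 + q) := by
  rcases h with h | h
  · exact Or.inl (occ_right A R q h)
  · exact Or.inr (occ_right A R q h)

lemma pvOcc_lt_length {low : List Char} {p : Nat} (h : pvOcc low p) : p < low.length := by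
  by_contra hge
  rw [not_lt] at hge
  have hnil : low.drop p = [] := List.drop_eq_nil_of_le hge
  rcases h with h | h
  · rw [hnil, List.prefix_nil] at h
    exact absurd h (by decide)
  · rw [hnil, List.prefix_nil] at h
    exact absurd h (by decide)

-- ---- lastComma facts ----

lemma lastComma_none_iff (s : List Char) (p : Nat) :
    lastComma s p = none ↔ ∀ j < p, s[j]? ≠ some ',' := by
  induction p with
  | zero => simp [lastComma]
  | succ p ih =>
    unfold lastComma
    by_cases hp : s[p]? = some ','
    · simp only [hp, if_pos]
      constructor
      · intro h; exact absurd h (by simp)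
      · intro h; exact absurd hp (h p (Nat.lt_succ_self p))
    · simp only [hp, if_neg, not_false_iff, ih]
      constructor
      · intro h j hj
        rcases Nat.lt_succ_iff_lt_or_eq.mp hj with hj' | hj'
        · exact h j hj'
        · exact hj' ▸ hp
      · intro h j hj; exact h j (Nat.lt_succ_of_lt hj)

lemma lastComma_eq_some_of (s : List Char) (p c : Nat) (hc : c < p) (hs : s[c]? = some ',')
    (hmax : ∀ j, c < j → j < p → s[j]? ≠ some ',') : lastComma s p = some c := by
  induction p with
  | zero => omega
  | succ p ih =>
    unfold lastComma
    by_cases hcp : c = p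
    · subst hcp
      simp [hs]
    · have hclt : c < p := by omega
      have hnp : s[p]? ≠ some ',' := hmax p hclt (Nat.lt_succ_self p)
      simp only [hnp, if_neg, not_false_iff]
      exact ih hclt (fun j hj hj' => hmax j hj (Nat.lt_succ_of_lt hj'))

lemma lastComma_append (a r : List Char) (p : Nat) :
    lastComma (a ++ ',' :: r) (a.length + 1 + p) =
      (match lastComma r p with
       | some c => some (a.length + 1 + c)
       | none => some a.length) := by
  induction p with
  | zero =>
    have hidx : (a ++ ',' :: r)[a.length]? = some ',' := by
      rw [List.getElem?_append_right (Nat.le_refl _)]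
      simp
    simp only [lastComma, hidx, if_pos]
  | succ p ih =>
    have harith : a.length + 1 + (p + 1) = (a.length + 1 + p) + 1 := by omega
    rw [harith]
    unfold lastComma
    have hidx : (a ++ ',' :: r)[a.length + 1 + p]? = r[p]? := by
      rw [List.getElem?_append_right (by omega)]
      have : a.length + 1 + p - a.length = p + 1 := by omega
      rw [this]
      simp
    rw [hidx]
    by_cases hp : r[p]? = some ','
    · simp [hp]
    · rw [if_neg hp, ih]
      rw [if_neg hp]

-- every list either has no comma or splits at its first comma
lemma comma_decomp (s : List Char) :
    ',' ∉ s ∨ ∃ a r, s = a ++ ',' :: r ∧ ',' ∉ a := by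
  induction s with
  | nil => exact Or.inl (List.not_mem_nil)
  | cons c t ih =>
    by_cases hc : c = ','
    · exact Or.inr ⟨[], t, by rw [hc]; rfl, List.not_mem_nil⟩
    · rcases ih with hnc | ⟨a, r, heq, hna⟩
      · left
        intro hm
        rcases List.mem_cons.mp hm with hm | hm
        · exact hc hm.symm
        · exact hnc hm
      · right
        refine ⟨c :: a, r, by rw [heq]; rfl, ?_⟩
        intro hm
        rcases List.mem_cons.mp hm with hm | hm
        · exact hc hm.symm
        · exact hna hm

-- ---- the main characterisation of A's joined prefix ----

lemma main_aux : ∀ (n : Nat) (s : List Char), s.length ≤ n → ∀ (P : Nat),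
    pvOcc (PySem.Chars.lower s) P → (∀ q < P, ¬ pvOcc (PySem.Chars.lower s) q) →
    (pvTakeParts (mySplit s) = [] ↔ lastComma s P = none) ∧
    PySem.Chars.join [','] (pvTakeParts (mySplit s)) =
      (match lastComma s P with
       | some c => s.take c
       | none => []) := by
  intro n
  induction n with
  | zero =>
    intro s hlen P hocc _
    have hs : s = [] := List.length_eq_zero_iff.mp (Nat.le_zero.mp hlen)
    subst hs
    exact absurd (pvOcc_lt_length hocc) (by simp [PySem.Chars.lower])
  | succ n ihn =>
    intro s hlen P hocc hmin
    rcases comma_decomp s with hnc | ⟨a, r, hseq, hnca⟩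
    · -- no comma in s: the whole string is the single part, and it is bad
      have hms : mySplit s = [s] := mySplit_no_comma s hnc
      have hhc : pvHasConstraint s = true := (hasC_iff s).mpr ⟨P, hocc⟩
      have hlc : lastComma s P = none := by
        rw [lastComma_none_iff]
        intro j _ hsj
        rcases List.getElem?_eq_some_iff.mp hsj with ⟨hj, hv⟩
        exact hnc (hv ▸ List.getElem_mem hj)
      rw [hms, hlc]
      simp [pvTakeParts, hhc, PySem.Chars.join_nil]
    · subst hseq
      rw [lower_append_comma] at hocc hmin
      have hlena : (PySem.Chars.lower a).length = a.length := by
        simp [PySem.Chars.lower]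
      by_cases hA : pvHasConstraint a = true
      · -- the first part is already bad: nothing is kept
        obtain ⟨p₀, hp₀⟩ := (hasC_iff a).mp hA
        have hp₀lt : p₀ < a.length := by
          have := pvOcc_lt_length hp₀
          omega
        have hPle : P ≤ p₀ := by
          by_contra hgt
          exact hmin p₀ (by omega) (pvOcc_left _ hp₀)
        have hlc : lastComma (a ++ ',' :: r) P = none := by
          rw [lastComma_none_iff]
          intro j hj hsj
          have hjlt : j < a.length := by omega
          rw [List.getElem?_append_left hjlt] at hsj
          rcases List.getElem?_eq_some_iff.mp hsj with ⟨hj', hv⟩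
          exact hnca (hv ▸ List.getElem_mem hj')
        rw [mySplit_append a r hnca, hlc]
        simp [pvTakeParts, hA, PySem.Chars.join_nil]
      · -- the first part is kept
        have hAf : pvHasConstraint a = false := by
          simpa using hA
        have hge : a.length + 1 ≤ P := by
          rcases pvOcc_split hocc with hl | ⟨hge, _⟩
          · exact absurd ((hasC_iff a).mpr ⟨P, hl⟩) hA
          · omega
        set P' := P - (a.length + 1) with hP'
        have hocc' : pvOcc (PySem.Chars.lower r) P' := by
          rcases pvOcc_split hocc with hl | ⟨_, hr⟩
          · exact absurd ((hasC_iff a).mpr ⟨P, hl⟩) hA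
          · rw [hP']
            rw [hlena] at hr
            exact hr
        have hmin' : ∀ q < P', ¬ pvOcc (PySem.Chars.lower r) q := by
          intro q hq hoq
          have := pvOcc_right (PySem.Chars.lower a) hoq
          rw [hlena] at this
          exact hmin (a.length + 1 + q) (by omega) this
        have hrlen : r.length ≤ n := by
          have : (a ++ ',' :: r).length = a.length + 1 + r.length := by
            simp
            omega
          omega
        obtain ⟨ihiff, ihjoin⟩ := ihn r hrlen P' hocc' hmin'
        have hPeq : P = a.length + 1 + P' := by omega
        rw [hPeq, lastComma_append a r P', mySplit_append a r hnca]
        have htp : pvTakeParts (a :: mySplit r) = a :: pvTakeParts (mySplit r) := by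
          simp [pvTakeParts, hAf]
        rw [htp]
        cases hlc : lastComma r P' with
        | none =>
          have hnilr : pvTakeParts (mySplit r) = [] := ihiff.mpr hlc
          rw [hnilr]
          constructor
          · simp
          · rw [PySem.Chars.join_singleton]
            exact (List.take_left).symm
        | some c' =>
          have hner : pvTakeParts (mySplit r) ≠ [] := by
            intro hh
            rw [hh] at ihiff
            rw [ihiff.mp rfl] at hlc
            exact absurd hlc (by simp)
          constructor
          · simp
          · rw [hlc] at ihjoin
            cases htps : pvTakeParts (mySplit r) with
            | nil => exact absurd htps hner
            | cons t ts =>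
              rw [htps] at ihjoin
              have ihjoin' : PySem.Chars.join [','] (t :: ts) = List.take c' r := ihjoin
              have harith : a.length + 1 + c' - a.length = c' + 1 := by omega
              rw [PySem.Chars.join_cons_cons]
              show a ++ [','] ++ PySem.Chars.join [','] (t :: ts) =
                List.take (a.length + 1 + c') (a ++ ',' :: r)
              rw [ihjoin', List.take_append, harith, List.take_succ_cons,
                List.take_of_length_le (show a.length ≤ a.length + 1 + c' by omega)]
              simp

-- ---- rfind on a single character ----

lemma single_prefix_iff (t : List Char) (c : Char) (k : Nat) :
    [c].isPrefixOf (t.drop k) = true ↔ t[k]? = some c := by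
  rw [← List.head?_drop]
  cases hd : t.drop k with
  | nil => simp [List.isPrefixOf]
  | cons d rest =>
    simp [List.isPrefixOf]
    exact eq_comm

lemma rfind_go_single (t : List Char) (c : Char) : ∀ (j : Nat),
    (PySem.Chars.rfind.go t [c] j = -1 ∧ ∀ k ≤ j, t[k]? ≠ some c) ∨
    (∃ m : Nat, m ≤ j ∧ PySem.Chars.rfind.go t [c] j = (m : Int) ∧ t[m]? = some c ∧
      ∀ k, m < k → k ≤ j → t[k]? ≠ some c) := by
  intro j
  induction j with
  | zero =>
    rw [PySem.Chars.rfind.go]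
    by_cases h0 : t[0]? = some c
    · right
      refine ⟨0, Nat.le_refl _, ?_, h0, fun k hk hk' => by omega⟩
      have hp : [c].isPrefixOf (t.drop 0) = true := (single_prefix_iff t c 0).mpr h0
      rw [List.drop_zero] at hp
      rw [if_pos hp]
      rfl
    · left
      refine ⟨?_, fun k hk => by
        have : k = 0 := Nat.le_zero.mp hk
        exact this ▸ h0⟩
      rw [if_neg]
      intro hpre
      have hp : [c].isPrefixOf (t.drop 0) = true := by rw [List.drop_zero]; exact hpre
      exact h0 ((single_prefix_iff t c 0).mp hp)
  | succ j ih =>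
    rw [PySem.Chars.rfind.go]
    by_cases hj : t[j + 1]? = some c
    · right
      refine ⟨j + 1, Nat.le_refl _, ?_, hj, fun k hk hk' => by omega⟩
      rw [if_pos ((single_prefix_iff t c (j + 1)).mpr hj)]
    · have hnp : ¬ [c].isPrefixOf (t.drop (j + 1)) = true := by
        intro hpre
        exact hj ((single_prefix_iff t c (j + 1)).mp hpre)
      rw [if_neg hnp]
      rcases ih with ⟨hval, hall⟩ | ⟨m, hm, hval, hc, hmax⟩
      · left
        refine ⟨hval, fun k hk => ?_⟩
        rcases Nat.lt_succ_iff_lt_or_eq.mp (Nat.lt_succ_of_le hk) with hk' | hk'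
        · exact hall k (by omega)
        · exact hk' ▸ hj
      · right
        refine ⟨m, by omega, hval, hc, fun k hk hk' => ?_⟩
        rcases Nat.lt_or_ge k (j + 1) with hk'' | hk''
        · exact hmax k hk (by omega)
        · have : k = j + 1 := by omega
          exact this ▸ hj

lemma rfind_single (t : List Char) (c : Char) :
    (PySem.Chars.rfind t [c] = -1 ∧ ∀ k : Nat, t[k]? ≠ some c) ∨
    (∃ m : Nat, PySem.Chars.rfind t [c] = (m : Int) ∧ t[m]? = some c ∧
      ∀ k : Nat, m < k → t[k]? ≠ some c) := by
  have hout : ∀ k : Nat, t.length < k → t[k]? ≠ some c := by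
    intro k hk h
    rw [List.getElem?_eq_none_iff.mpr (by omega)] at h
    exact absurd h (by simp)
  rcases rfind_go_single t c t.length with ⟨hval, hall⟩ | ⟨m, hm, hval, hc, hmax⟩
  · left
    refine ⟨hval, fun k => ?_⟩
    rcases Nat.lt_or_ge t.length k with hk | hk
    · exact hout k hk
    · exact hall k hk
  · right
    refine ⟨m, hval, hc, fun k hk => ?_⟩
    rcases Nat.lt_or_ge t.length k with hk' | hk'
    · exact hout k hk'
    · exact hmax k hk hk'

-- ---- assembling the B side ----

lemma guard_iff (s : List Char) :
    pvHasConstraint s = false ↔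
      (PySem.Chars.find (PySem.Chars.lower s) pvK1 = -1 ∧
       PySem.Chars.find (PySem.Chars.lower s) pvK2 = -1) := by
  unfold pvHasConstraint PySem.Chars.isIn
  rw [Bool.or_eq_false_iff]
  simp [bne]

lemma no_occ_of_find_neg (low K : List Char) (h : PySem.Chars.find low K = -1) :
    ∀ p, ¬ K <+: low.drop p := by
  intro p hp
  have hin : PySem.Chars.isIn K low = true :=
    (PySem.Chars.exists_prefix_drop_iff_isIn K low).mp ⟨p, hp⟩
  rw [PySem.Chars.isIn_iff_infix] at hin
  exact (PySem.Chars.find_eq_neg_one_iff low K).mp h hin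

lemma find_spec' (low K : List Char) (h : PySem.Chars.find low K ≠ -1) :
    0 ≤ PySem.Chars.find low K ∧
    K <+: low.drop (PySem.Chars.find low K).toNat ∧
    ∀ i < (PySem.Chars.find low K).toNat, ¬ K <+: low.drop i := by
  have h0 : 0 ≤ PySem.Chars.find low K := by
    have := PySem.Chars.neg_one_le_find low K
    omega
  exact ⟨h0, (PySem.Chars.find_spec h0).1, (PySem.Chars.find_spec h0).2⟩

lemma pos_spec (low : List Char) (pos : Int)
    (hpos : pos = (if PySem.Chars.find low pvK1 = -1 then PySem.Chars.find low pvK2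
      else if PySem.Chars.find low pvK2 = -1 then PySem.Chars.find low pvK1
      else min (PySem.Chars.find low pvK1) (PySem.Chars.find low pvK2)))
    (h : ¬(PySem.Chars.find low pvK1 = -1 ∧ PySem.Chars.find low pvK2 = -1)) :
    0 ≤ pos ∧ pos ≤ (low.length : Int) ∧ pvOcc low pos.toNat ∧
      ∀ q < pos.toNat, ¬ pvOcc low q := by
  by_cases h1 : PySem.Chars.find low pvK1 = -1
  · have h2 : PySem.Chars.find low pvK2 ≠ -1 := fun h2 => h ⟨h1, h2⟩
    rw [if_pos h1] at hpos
    obtain ⟨h0, hpre, hmin⟩ := find_spec' low pvK2 h2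
    subst hpos
    refine ⟨h0, PySem.Chars.find_le_length low pvK2, Or.inr hpre, fun q hq => ?_⟩
    rintro (hk | hk)
    · exact no_occ_of_find_neg low pvK1 h1 q hk
    · exact hmin q hq hk
  · rw [if_neg h1] at hpos
    obtain ⟨h01, hpre1, hmin1⟩ := find_spec' low pvK1 h1
    by_cases h2 : PySem.Chars.find low pvK2 = -1
    · rw [if_pos h2] at hpos
      subst hpos
      refine ⟨h01, PySem.Chars.find_le_length low pvK1, Or.inl hpre1, fun q hq => ?_⟩
      rintro (hk | hk)
      · exact hmin1 q hq hk
      · exact no_occ_of_find_neg low pvK2 h2 q hk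
    · rw [if_neg h2] at hpos
      obtain ⟨h02, hpre2, hmin2⟩ := find_spec' low pvK2 h2
      subst hpos
      rcases le_total (PySem.Chars.find low pvK1) (PySem.Chars.find low pvK2) with hle | hle
      · rw [min_eq_left hle]
        refine ⟨h01, PySem.Chars.find_le_length low pvK1, Or.inl hpre1, fun q hq => ?_⟩
        rintro (hk | hk)
        · exact hmin1 q hq hk
        · exact hmin2 q (by omega) hk
      · rw [min_eq_right hle]
        refine ⟨h02, PySem.Chars.find_le_length low pvK2, Or.inr hpre2, fun q hq => ?_⟩
        rintro (hk | hk)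
        · exact hmin1 q (by omega) hk
        · exact hmin2 q hq hk

lemma rfindFrom_zero_take (low : List Char) (pos : Int) (h0 : 0 ≤ pos)
    (hle : pos ≤ (low.length : Int)) :
    PySem.Chars.rfindFrom low [','] 0 (some pos) =
      PySem.Chars.rfind (low.take pos.toNat) [','] := by
  unfold PySem.Chars.rfindFrom
  simp only
  rw [if_neg (show ¬((low.length : Int) < pos) by omega),
    if_neg (show ¬(pos < (0 : Int)) by omega)]
  norm_num
  omega

-- a comma of the lowered, truncated string is a comma of the original string
lemma take_lower_comma_iff (s : List Char) (P j : Nat) (hj : j < P) :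
    ((PySem.Chars.lower s).take P)[j]? = some ',' ↔ s[j]? = some ',' := by
  rw [List.getElem?_take, if_pos hj, lower_comma_iff]

-- ===== VERDICT (by name: the statement is the Claim_ definition above) =====
theorem strip_constraint_spec : Claim_equal_strip_constraint := by
  intro tbl_schema _dom
  unfold Spec_strip_constraint strip_constraint strip_constraint_alt
  by_cases hg : pvHasConstraint tbl_schema.toList = false
  · obtain ⟨h1, h2⟩ := (guard_iff tbl_schema.toList).mp hg
    rw [if_pos hg, if_pos ⟨h1, h2⟩]
  · have hcond : ¬(PySem.Chars.find (PySem.Chars.lower tbl_schema.toList) pvK1 = -1 ∧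
        PySem.Chars.find (PySem.Chars.lower tbl_schema.toList) pvK2 = -1) := by
      intro hc
      exact hg ((guard_iff tbl_schema.toList).mpr hc)
    rw [if_neg hg, if_neg hcond]
    dsimp only
    obtain ⟨hpos0, hposle, hoccP, hminP⟩ :=
      pos_spec (PySem.Chars.lower tbl_schema.toList) _ rfl hcond
    rw [rfindFrom_zero_take _ _ hpos0 (by simpa [PySem.Chars.lower] using hposle)]
    set s := tbl_schema.toList with hs
    set pos := (if PySem.Chars.find (PySem.Chars.lower s) pvK1 = -1 then
        PySem.Chars.find (PySem.Chars.lower s) pvK2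
      else if PySem.Chars.find (PySem.Chars.lower s) pvK2 = -1 then
        PySem.Chars.find (PySem.Chars.lower s) pvK1
      else min (PySem.Chars.find (PySem.Chars.lower s) pvK1)
        (PySem.Chars.find (PySem.Chars.lower s) pvK2)) with hposdef
    obtain ⟨_, hjoin⟩ := main_aux s.length s (Nat.le_refl _) pos.toNat hoccP hminP
    rcases rfind_single ((PySem.Chars.lower s).take pos.toNat) ',' with
      ⟨hval, hall⟩ | ⟨m, hval, hcm, hmax⟩
    · rw [hval, if_pos rfl]
      have hlc : lastComma s pos.toNat = none := by
        rw [lastComma_none_iff]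
        intro j hj hsj
        exact hall j ((take_lower_comma_iff s pos.toNat j hj).mpr hsj)
      rw [hlc] at hjoin
      rw [splitOn_eq, hjoin]
      rfl
    · rw [hval, if_neg (by omega)]
      have hmlt : m < pos.toNat := by
        rcases List.getElem?_eq_some_iff.mp hcm with ⟨hlt, _⟩
        rw [List.length_take] at hlt
        omega
      have hsm : s[m]? = some ',' := (take_lower_comma_iff s pos.toNat m hmlt).mp hcm
      have hlc : lastComma s pos.toNat = some m := by
        apply lastComma_eq_some_of s pos.toNat m hmlt hsm
        intro j hjm hjp hsj
        exact hmax j hjm ((take_lower_comma_iff s pos.toNat j hjp).mpr hsj)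
      rw [hlc] at hjoin
      rw [splitOn_eq, hjoin]
      rw [PySem.Chars.slice, PySem.List.slice_to s (by omega : (0:Int) ≤ (m : Int))]
      rw [Int.toNat_natCast]
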